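-- pv_equiv track=rewrite | github.com/TNick/exdrf | exdrf-qt/exdrf_qt/scripts/gen_ui_file.py | _split_long_string_line
-- ===== SOURCE A (Python) =====
-- from typing import List, Optional, Set, Tuple
--
-- MAX_LINE_LENGTH = 80
--
-- def _split_long_string_line(
--     line: str, max_length: int = MAX_LINE_LENGTH
-- ) -> List[str]:
--     """Split a long string line into multiple concatenated double-quoted lines.
--
--     If the line is a single line containing one double- or triple-quoted string
--     (e.g. from _translate(..., "long text")) and exceeds max_length, returns a
--     list of lines with the string split at word boundaries into adjacent
--     string literals. Triple-quoted strings are converted to multiple "xyz"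
--     lines. Otherwise returns [line].
--     """
--     if len(line) <= max_length:
--         return [line]
--     stripped = line.lstrip()
--     indent = line[: len(line) - len(stripped)]
--     quote_len = 1
--     if stripped.startswith('"""'):
--         quote_len = 3
--     elif stripped.startswith("'''"):
--         quote_len = 3
--     elif not stripped.startswith('"'):
--         return [line]
--     # Find the closing quote(s), respecting backslash-escaped quotes.
--     i = len(indent) + quote_len
--     content_parts: List[str] = []
--     close_quote = line[len(indent) : len(indent) + quote_len]
--     while i < len(line):
--         if line[i] == "\\" and i + 1 < len(line):
--             content_parts.append(line[i : i + 2])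
--             i += 2
--             continue
--         if (
--             i + quote_len <= len(line)
--             and line[i : i + quote_len] == close_quote
--         ):
--             break
--         content_parts.append(line[i])
--         i += 1
--     else:
--         return [line]
--     content = "".join(content_parts)
--     tail = line[i + quote_len :]
--     max_chunk = max_length - len(indent) - 2
--     if max_chunk < 10:
--         return [line]
--     words = content.split(" ")
--     chunks = _chunk_words(words, max_chunk)
--     if len(chunks) <= 1:
--         return [line]
--     result = [indent + '"' + chunk + '"' for chunk in chunks[:-1]]
--     result.append(indent + '"' + chunks[-1] + '"' + tail)
--     return result
--
-- def _chunk_words(words: List[str], max_chunk: int) -> List[str]: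
--     """Split a list of words into chunks of at most max_chunk characters."""
--     chunks: List[str] = []
--     current: List[str] = []
--     current_len = 0
--     for w in words:
--         need = len(w) + (1 if current else 0)
--         if current and current_len + need > max_chunk:
--             chunks.append(" ".join(current))
--             current = [w]
--             current_len = len(w)
--         else:
--             current.append(w)
--             current_len += need
--     if current:
--         chunks.append(" ".join(current))
--     return chunks
-- ===== SOURCE B (Python) =====
-- from typing import List, Optional, Tuple
--
-- MAX_LINE_LENGTH = 80
--
--
-- def _split_long_string_line(line: str, max_length: int = MAX_LINE_LENGTH) -> List[str]:
--     """Split a long quoted line into wrapped string literals (single-pass parse)."""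
--     if len(line) <= max_length:
--         return [line]
--     stripped = line.lstrip()
--     indent = line[: len(line) - len(stripped)]
--     if stripped[:3] in ('"""', "'''"):
--         quote_len = 3
--     elif stripped[:1] == '"':
--         quote_len = 1
--     else:
--         return [line]
--     close = stripped[:quote_len]
--     parsed = _consume_literal(line[len(indent) + quote_len:], close)
--     if parsed is None:
--         return [line]
--     content, tail = parsed
--     max_chunk = max_length - len(indent) - 2
--     if max_chunk < 10:
--         return [line]
--     chunks = _greedy_chunks(content.split(" "), max_chunk)
--     if len(chunks) <= 1:
--         return [line]
--     wrapped = [indent + '"' + c + '"' for c in chunks]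
--     wrapped[-1] += tail
--     return wrapped
--
--
-- def _consume_literal(body: str, close: str) -> Optional[Tuple[str, str]]:
--     """One forward pass over body with a skip flag for escapes; returns
--     (content before the closing quote, text after it), or None if unterminated."""
--     parts: List[str] = []
--     skip = False
--     for i, ch in enumerate(body):
--         if skip:
--             skip = False
--             parts.append(ch)
--         elif ch == "\\" and i + 1 < len(body):
--             skip = True
--             parts.append(ch)
--         elif body.startswith(close, i):
--             return "".join(parts), body[i + len(close):]
--         else:
--             parts.append(ch)
--     return None
--
--
-- def _greedy_chunks(words: List[str], max_chunk: int) -> List[str]: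
--     """Peel off one maximal chunk at a time from the front of the word list."""
--     chunks: List[str] = []
--     while words:
--         first, k = words[0], 1
--         while k < len(words) and len(first) + 1 + len(words[k]) <= max_chunk:
--             first = first + " " + words[k]
--             k += 1
--         chunks.append(first)
--         words = words[k:]
--     return chunks
-- ===== Notes on version B (the rewrite author's own statement) =====
-- stated objective: alternative
-- what changed: A's while-loop that jumps an index by 1 or 2 through the line to find the closing quote is replaced by a single forward enumerate pass with a boolean skip flag for escaped characters; A's fold-style word chunking carrying (chunks, current word list, running length) is replaced by repeatedly peeling one maximal chunk off the front of the word list; and A's dropLast/last assembly is replaced by wrapping every chunk and then appending the tail to the last line.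
import Mathlib
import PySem

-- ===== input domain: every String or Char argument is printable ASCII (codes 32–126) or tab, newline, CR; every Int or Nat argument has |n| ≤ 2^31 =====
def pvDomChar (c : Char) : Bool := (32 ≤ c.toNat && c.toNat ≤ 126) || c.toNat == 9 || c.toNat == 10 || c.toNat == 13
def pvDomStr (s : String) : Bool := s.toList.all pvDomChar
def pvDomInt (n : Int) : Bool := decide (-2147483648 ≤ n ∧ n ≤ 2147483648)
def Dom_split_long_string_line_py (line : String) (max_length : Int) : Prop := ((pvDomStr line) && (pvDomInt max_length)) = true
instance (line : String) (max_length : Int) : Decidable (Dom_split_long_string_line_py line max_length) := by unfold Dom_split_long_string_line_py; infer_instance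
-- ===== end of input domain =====

-- B replaces A's index-jumping close-quote scan by a single forward pass with a skip
-- flag for escapes, A's fold-with-counter word chunking by peeling one maximal chunk
-- at a time off the word list, and the dropLast/last assembly by wrapping every chunk
-- and appending the tail to the last line (objective: alternative).

-- ===== PORT A =====

-- A's while loop: state (i, content_parts); returns none when the loop "falls off
-- the end" (Python's while-else), some (content_parts, i) at the break.
def pvScanA (l close : List Char) (i : Nat) (parts : List (List Char)) :
    Option (List (List Char) × Nat) :=
  if h : i < l.length then
    if l[i] = '\\' ∧ i + 1 < l.length then
      -- content_parts.append(line[i:i+2]); i += 2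
      pvScanA l close (i + 2) (parts ++ [PySem.List.slice l (some (i : Int)) (some ((i : Int) + 2))])
    else if i + close.length ≤ l.length ∧
        PySem.List.slice l (some (i : Int)) (some ((i : Int) + (close.length : Int))) = close then
      some (parts, i)
    else
      -- content_parts.append(line[i]); i += 1
      pvScanA l close (i + 1) (parts ++ [[l[i]]])
  else none
termination_by l.length - i
decreasing_by all_goals omega

-- _chunk_words' loop body: state (chunks, current, current_len)
def pvChunkAStep (mc : Int) (st : List (List Char) × List (List Char) × Int) (w : List Char) :
    List (List Char) × List (List Char) × Int :=
  let need : Int := (w.length : Int) + (if st.2.1 ≠ [] then 1 else 0)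
  if st.2.1 ≠ [] ∧ st.2.2 + need > mc then
    (st.1 ++ [PySem.Chars.join [' '] st.2.1], [w], (w.length : Int))
  else
    (st.1, st.2.1 ++ [w], st.2.2 + need)

-- _chunk_words
def pvChunkA (words : List (List Char)) (max_chunk : Int) : List (List Char) :=
  let fin := words.foldl (pvChunkAStep max_chunk) ([], [], 0)
  if fin.2.1 ≠ [] then fin.1 ++ [PySem.Chars.join [' '] fin.2.1] else fin.1

-- everything of A after the quote_len branching
def pvRestA (line : String) (l indent : List Char) (ql : Nat) (max_length : Int) : List String :=
  let close := PySem.List.slice l (some (indent.length : Int)) (some ((indent.length : Int) + (ql : Int)))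
  match pvScanA l close (indent.length + ql) [] with
  | none => [line]
  | some (parts, i) =>
    let content := PySem.Chars.join [] parts
    let tail := PySem.List.slice l (some ((i + ql : Nat) : Int)) none
    let max_chunk : Int := max_length - (indent.length : Int) - 2
    if max_chunk < 10 then [line]
    else
      let words := PySem.Chars.splitOn content [' ']
      let chunks := pvChunkA words max_chunk
      if (chunks.length : Int) ≤ 1 then [line]
      else
        (chunks.dropLast.map (fun c => String.ofList (indent ++ ['"'] ++ c ++ ['"']))) ++
          [String.ofList (indent ++ ['"'] ++ ((PySem.List.pyGet? chunks (-1)).getD []) ++ ['"'] ++ tail)]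

def split_long_string_line_py (line : String) (max_length : Int) : List String :=
  let l := line.toList
  if (l.length : Int) ≤ max_length then [line]
  else
    let stripped := PySem.Chars.lstrip l
    let indent := l.take (l.length - stripped.length)  -- line[:len(line)-len(stripped)], nonneg bound
    if PySem.Chars.startswith stripped ['"', '"', '"'] then pvRestA line l indent 3 max_length
    else if PySem.Chars.startswith stripped ['\'', '\'', '\''] then pvRestA line l indent 3 max_length
    else if ¬ (PySem.Chars.startswith stripped ['"']) then [line]
    else pvRestA line l indent 1 max_length

-- ===== PORT B =====

-- B's _consume_literal: one forward pass over the body (the enumerate for-loop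
-- becomes recursion on the char list), a Bool skip flag for the char after a
-- backslash; parts are single chars, "".join is flatten.
def pvConsumeB (close : List Char) : List Char → Bool → List (List Char) →
    Option (List Char × List Char)
  | [], _, _ => none
  | c :: rest, true, parts => pvConsumeB close rest false (parts ++ [[c]])
  | c :: rest, false, parts =>
    if c = '\\' ∧ rest ≠ [] then pvConsumeB close rest true (parts ++ [[c]])
    else if close.isPrefixOf (c :: rest) then
      some (parts.flatten, (c :: rest).drop close.length)
    else pvConsumeB close rest false (parts ++ [[c]])

-- B's inner while in _greedy_chunks: grow `first` while the next word fits
def pvTakeChunk (mc : Int) (first : List Char) : List (List Char) → List Char × List (List Char)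
  | [] => (first, [])
  | w :: ws =>
    if (first.length : Int) + 1 + (w.length : Int) ≤ mc then
      pvTakeChunk mc (first ++ ' ' :: w) ws
    else (first, w :: ws)

-- termination helper for pvChunksB (cited in its decreasing_by)
theorem pvTakeChunk_le (mc : Int) : ∀ (f : List Char) (ws : List (List Char)),
    (pvTakeChunk mc f ws).2.length ≤ ws.length := by
  intro f ws
  induction ws generalizing f with
  | nil => simp [pvTakeChunk]
  | cons w ws ih =>
    by_cases h : (f.length : Int) + 1 + (w.length : Int) ≤ mc
    · simp only [pvTakeChunk, if_pos h]
      exact le_trans (ih _) (by simp)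
    · simp [pvTakeChunk, if_neg h]

-- B's outer while in _greedy_chunks: peel one maximal chunk off the front
def pvChunksB (mc : Int) : List (List Char) → List (List Char)
  | [] => []
  | w :: ws =>
    let p := pvTakeChunk mc w ws
    p.1 :: pvChunksB mc p.2
termination_by ws => ws.length
decreasing_by simpa using Nat.lt_succ_of_le (pvTakeChunk_le mc w ws)

-- wrapped[-1] += tail
def pvAppendLast (tail : List Char) : List (List Char) → List (List Char)
  | [] => []
  | [c] => [c ++ tail]
  | c :: c2 :: rest => c :: pvAppendLast tail (c2 :: rest)

-- everything of B after the quote_len branching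
def pvGoB (line : String) (l indent stripped : List Char) (ql : Nat) (max_length : Int) :
    List String :=
  let close := stripped.take ql                           -- stripped[:quote_len]
  match pvConsumeB close (l.drop (indent.length + ql)) false [] with  -- line[len(indent)+quote_len:]
  | none => [line]
  | some (content, tail) =>
    let max_chunk : Int := max_length - (indent.length : Int) - 2
    if max_chunk < 10 then [line]
    else
      let chunks := pvChunksB max_chunk (PySem.Chars.splitOn content [' '])
      if (chunks.length : Int) ≤ 1 then [line]
      else
        (pvAppendLast tail (chunks.map (fun c => indent ++ '"' :: c ++ ['"']))).map String.ofList

def split_long_string_line_py_alt (line : String) (max_length : Int) : List String :=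
  let l := line.toList
  if (l.length : Int) ≤ max_length then [line]
  else
    let stripped := PySem.Chars.lstrip l
    let indent := l.take (l.length - stripped.length)  -- line[:len(line)-len(stripped)], nonneg bound
    if stripped.take 3 = ['"', '"', '"'] ∨ stripped.take 3 = ['\'', '\'', '\''] then
      pvGoB line l indent stripped 3 max_length
    else if stripped.take 1 = ['"'] then
      pvGoB line l indent stripped 1 max_length
    else [line]

-- ===== PRECONDITION & SPEC =====
def Spec_split_long_string_line_py (line : String) (max_length : Int) (out : List String) : Prop := out = split_long_string_line_py_alt line max_length
instance (line : String) (max_length : Int) (out : List String) : Decidable (Spec_split_long_string_line_py line max_length out) := by unfold Spec_split_long_string_line_py; infer_instance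

-- ===== CLAIM (what is proved, stated in full; the proofs are below) =====
def Claim_equal_split_long_string_line_py : Prop := ∀ (line : String) (max_length : Int), Dom_split_long_string_line_py line max_length → Spec_split_long_string_line_py line max_length (split_long_string_line_py line max_length)

-- ===== LEMMAS AND PROOFS =====

theorem pv_slice_nat (l : List Char) (i k : Nat) :
    PySem.List.slice l (some (i : Int)) (some ((i : Int) + (k : Int))) = (l.drop i).take k := by
  have h : ((i : Int) + (k : Int)) = ((i + k : Nat) : Int) := by push_cast; ring
  rw [h, PySem.List.slice_natCast]
  congr 1
  omega

-- "".join is flatten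
theorem pv_join_empty (ps : List (List Char)) : PySem.Chars.join [] ps = ps.flatten := by
  induction ps with
  | nil => simp [PySem.Chars.join_nil]
  | cons p rest ih =>
    cases rest with
    | nil => simp [PySem.Chars.join_singleton]
    | cons q r => simp [PySem.Chars.join_cons_cons] at *; simp [ih]

-- " ".join over a snoc
theorem pv_join_snoc (xs : List (List Char)) (w : List Char) (hx : xs ≠ []) :
    PySem.Chars.join [' '] (xs ++ [w]) = PySem.Chars.join [' '] xs ++ ' ' :: w := by
  induction xs with
  | nil => simp at hx
  | cons a r ih =>
    cases r with
    | nil => simp [PySem.Chars.join_cons_cons, PySem.Chars.join_singleton]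
    | cons b t =>
      have := ih (by simp)
      simp only [List.cons_append, PySem.Chars.join_cons_cons] at *
      simp [this]

-- A's close-quote test is exactly "close is a prefix of l.drop i"
theorem pv_close_test (l close : List Char) (hne : close ≠ []) (i : Nat) :
    (i + close.length ≤ l.length ∧
      PySem.List.slice l (some (i : Int)) (some ((i : Int) + (close.length : Int))) = close)
      ↔ close <+: l.drop i := by
  rw [pv_slice_nat]
  constructor
  · rintro ⟨hlen, hsl⟩
    rw [← hsl]
    exact List.take_prefix ..
  · intro h
    have htake := List.prefix_iff_eq_take.mp h
    have hlen : close.length ≤ (l.drop i).length := h.length_le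
    have hi : close.length ≤ l.length - i := by simpa using hlen
    have hil : i < l.length := by
      by_contra h1
      rw [List.drop_eq_nil_of_le (by omega)] at h
      exact hne (List.prefix_nil.mp h)
    exact ⟨by omega, htake.symm⟩

-- A's scan and B's skip-flag pass find the same content and break position
theorem pv_scan_consume (l close : List Char) (hcl : close ≠ []) :
    ∀ (n i : Nat) (parts acc : List (List Char)), l.length - i ≤ n →
    acc.flatten = parts.flatten →
    pvConsumeB close (l.drop i) false acc =
      (pvScanA l close i parts).map (fun p => (p.1.flatten, l.drop (p.2 + close.length))) := by
  intro n
  induction n with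
  | zero =>
    intro i parts acc hn hinv
    rw [pvScanA, dif_neg (by omega), List.drop_eq_nil_of_le (by omega)]
    rfl
  | succ n ih =>
    intro i parts acc hn hinv
    by_cases hi : i < l.length
    · have hdropi : l.drop i = l[i] :: l.drop (i + 1) := List.drop_eq_getElem_cons hi
      rw [pvScanA, dif_pos hi, hdropi]
      have hrest : l.drop (i + 1) ≠ [] ↔ i + 1 < l.length := by
        rw [ne_eq, List.drop_eq_nil_iff]
        omega
      by_cases hesc : l[i] = '\\' ∧ i + 1 < l.length
      · have hesc' : l[i] = '\\' ∧ l.drop (i + 1) ≠ [] := ⟨hesc.1, hrest.mpr hesc.2⟩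
        rw [if_pos hesc]
        have hdropi1 : l.drop (i + 1) = l[i + 1]'hesc.2 :: l.drop (i + 2) :=
          List.drop_eq_getElem_cons hesc.2
        have hsl2 : PySem.List.slice l (some (i : Int)) (some ((i : Int) + 2))
            = [l[i], l[i + 1]'hesc.2] := by
          have h2 : ((i : Int) + 2) = ((i : Int) + ((2 : Nat) : Int)) := by norm_num
          rw [h2, pv_slice_nat, hdropi, hdropi1]
          rfl
        have hstep : pvConsumeB close (l[i] :: l.drop (i + 1)) false acc
            = pvConsumeB close (l.drop (i + 2)) false (acc ++ [[l[i]]] ++ [[l[i + 1]'hesc.2]]) := by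
          rw [pvConsumeB, if_pos hesc', hdropi1, pvConsumeB]
        rw [hstep, hsl2,
          ih (i + 2) (parts ++ [[l[i], l[i + 1]'hesc.2]]) _ (by omega) (by simp [hinv])]
      · rw [if_neg hesc]
        have hesc' : ¬ (l[i] = '\\' ∧ l.drop (i + 1) ≠ []) := by
          rw [hrest]; exact hesc
        by_cases hcond : i + close.length ≤ l.length ∧
            PySem.List.slice l (some (i : Int)) (some ((i : Int) + (close.length : Int))) = close
        · rw [if_pos hcond]
          have hpre : close <+: l.drop i := (pv_close_test l close hcl i).mp hcond
          rw [pvConsumeB, if_neg hesc',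
            if_pos ((List.isPrefixOf_iff_prefix).mpr (hdropi ▸ hpre))]
          simp only [Option.map_some]
          rw [← hdropi, List.drop_drop, hinv]
        · rw [if_neg hcond]
          have hnpre : ¬ close <+: l.drop i :=
            fun h => hcond ((pv_close_test l close hcl i).mpr h)
          rw [pvConsumeB, if_neg hesc',
            if_neg (fun h => hnpre (hdropi ▸ (List.isPrefixOf_iff_prefix).mp h)),
            ih (i + 1) (parts ++ [[l[i]]]) _ (by omega) (by simp [hinv])]
    · rw [pvScanA, dif_neg hi, List.drop_eq_nil_of_le (by omega)]
      rfl

-- A's fold state (chunks, current, len) after the first word equals chunk-peeling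
def pvFinA (fin : List (List Char) × List (List Char) × Int) : List (List Char) :=
  if fin.2.1 ≠ [] then fin.1 ++ [PySem.Chars.join [' '] fin.2.1] else fin.1

theorem pv_chunkA_shift (mc : Int) :
    ∀ (ws chunks current : List (List Char)), current ≠ [] →
    pvFinA (ws.foldl (pvChunkAStep mc)
        (chunks, current, ((PySem.Chars.join [' '] current).length : Int))) =
      chunks ++ (pvTakeChunk mc (PySem.Chars.join [' '] current) ws).1 ::
        pvChunksB mc (pvTakeChunk mc (PySem.Chars.join [' '] current) ws).2 := by
  intro ws
  induction ws with
  | nil =>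
    intro chunks current h
    simp [pvFinA, h, pvTakeChunk, pvChunksB]
  | cons w ws ih =>
    intro chunks current h
    set cur := PySem.Chars.join [' '] current with hcur
    rw [List.foldl_cons]
    by_cases hfit : (cur.length : Int) + 1 + (w.length : Int) ≤ mc
    · -- the word is appended to current
      have hstep : pvChunkAStep mc (chunks, current, (cur.length : Int)) w
          = (chunks, current ++ [w],
              ((PySem.Chars.join [' '] (current ++ [w])).length : Int)) := by
        simp only [pvChunkAStep]
        rw [if_neg (by rintro ⟨-, hgt⟩; rw [if_pos h] at hgt; omega), if_pos h,
          pv_join_snoc current w h, ← hcur]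
        simp only [List.length_append, List.length_cons]
        push_cast
        ring_nf
      rw [hstep, ih chunks (current ++ [w]) (by simp),
        pv_join_snoc current w h, ← hcur]
      rw [pvTakeChunk, if_pos hfit]
    · -- flush: current becomes a chunk, the word starts a new one
      have hstep : pvChunkAStep mc (chunks, current, (cur.length : Int)) w
          = (chunks ++ [cur], [w], ((PySem.Chars.join [' '] [w]).length : Int)) := by
        simp only [pvChunkAStep]
        rw [if_pos ⟨h, by rw [if_pos h]; omega⟩, ← hcur, PySem.Chars.join_singleton]
      rw [hstep, ih (chunks ++ [cur]) [w] (by simp), PySem.Chars.join_singleton]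
      rw [pvTakeChunk, if_neg hfit]
      conv_rhs => rw [pvChunksB]
      simp

theorem pv_chunk_eq (words : List (List Char)) (mc : Int) :
    pvChunkA words mc = pvChunksB mc words := by
  cases words with
  | nil => simp [pvChunkA, pvChunksB]
  | cons w ws =>
    have hfirst : pvChunkAStep mc ([], [], 0) w = ([], [w], ((PySem.Chars.join [' '] [w]).length : Int)) := by
      simp [pvChunkAStep, PySem.Chars.join_singleton]
    have h := pv_chunkA_shift mc ws [] [w] (by simp)
    show pvFinA ((w :: ws).foldl (pvChunkAStep mc) ([], [], 0)) = _
    rw [List.foldl_cons, hfirst, h, PySem.Chars.join_singleton]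
    conv_rhs => rw [pvChunksB]
    simp

-- B's wrap-everything-then-fix-the-last equals A's dropLast/last assembly
theorem pv_render_eq (indent tail : List Char) :
    ∀ (chunks : List (List Char)), chunks ≠ [] →
    (pvAppendLast tail (chunks.map (fun c => indent ++ '"' :: c ++ ['"']))).map String.ofList =
      (chunks.dropLast.map (fun c => String.ofList (indent ++ ['"'] ++ c ++ ['"']))) ++
      [String.ofList (indent ++ ['"'] ++ ((PySem.List.pyGet? chunks (-1)).getD []) ++ ['"'] ++ tail)] := by
  intro chunks
  induction chunks with
  | nil => intro h; exact absurd rfl h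
  | cons c rest ih =>
    intro _
    cases rest with
    | nil =>
      simp [pvAppendLast, PySem.List.pyGet?_neg_one]
    | cons c2 rest2 =>
      have := ih (by simp)
      simp only [List.map_cons, pvAppendLast] at this ⊢
      rw [this]
      simp [PySem.List.pyGet?_neg_one]

-- the whole tail after the quote branching agrees
theorem pv_rest_eq (line : String) (l indent stripped : List Char) (ql : Nat) (max_length : Int)
    (hql : 0 < ql) (hdrop : l.drop indent.length = stripped)
    (hlen : indent.length + ql ≤ l.length) :
    pvRestA line l indent ql max_length = pvGoB line l indent stripped ql max_length := by
  have hcloseA : PySem.List.slice l (some (indent.length : Int))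
      (some ((indent.length : Int) + (ql : Int))) = stripped.take ql := by
    rw [pv_slice_nat, hdrop]
  have hclen : (stripped.take ql).length = ql := by
    rw [List.length_take, ← hdrop]
    simp
    omega
  have hcne : stripped.take ql ≠ [] := by
    intro h
    rw [h] at hclen
    simp at hclen
    omega
  have hsc := pv_scan_consume l (stripped.take ql) hcne l.length (indent.length + ql) [] []
    (by omega) rfl
  simp only [pvRestA, pvGoB]
  rw [hcloseA, hsc]
  cases hscan : pvScanA l (stripped.take ql) (indent.length + ql) [] with
  | none => simp
  | some pr =>
    obtain ⟨parts, j⟩ := pr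
    simp only [Option.map_some]
    have hcontent : PySem.Chars.join [] parts = parts.flatten := pv_join_empty parts
    have htail : PySem.List.slice l (some ((j + ql : Nat) : Int)) none
        = l.drop (j + (stripped.take ql).length) := by
      rw [PySem.List.slice_from_natCast, hclen]
    rw [hcontent, htail, pv_chunk_eq]
    by_cases hmc : max_length - (indent.length : Int) - 2 < 10
    · rw [if_pos hmc, if_pos hmc]
    · rw [if_neg hmc, if_neg hmc]
      set chunks := pvChunksB (max_length - (indent.length : Int) - 2)
        (PySem.Chars.splitOn parts.flatten [' ']) with hch
      by_cases hlen1 : (chunks.length : Int) ≤ 1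
      · rw [if_pos hlen1, if_pos hlen1]
      · rw [if_neg hlen1, if_neg hlen1,
          pv_render_eq indent (l.drop (j + (stripped.take ql).length)) chunks
            (by intro h; rw [h] at hlen1; simp at hlen1)]

-- ===== VERDICT (by name: the statement is the Claim_ definition above) =====
theorem split_long_string_line_py_spec : Claim_equal_split_long_string_line_py := by
  intro line max_length _
  unfold Spec_split_long_string_line_py split_long_string_line_py split_long_string_line_py_alt
  simp only []
  by_cases h0 : ((line.toList.length : Int) ≤ max_length)
  · rw [if_pos h0, if_pos h0]
  · rw [if_neg h0, if_neg h0]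
    set l := line.toList with hl
    set stripped := PySem.Chars.lstrip l with hstr
    set indent := l.take (l.length - stripped.length) with hind
    have hstr' : stripped = List.dropWhile PySem.Chars.isspace l := by rw [hstr]; rfl
    have hsum : (l.takeWhile PySem.Chars.isspace).length + stripped.length = l.length := by
      rw [hstr', ← List.length_append, List.takeWhile_append_dropWhile]
    have hstrle : stripped.length ≤ l.length := by omega
    have hindlen : indent.length = l.length - stripped.length := by
      rw [hind, List.length_take]
      omega
    have hdw : ∀ (xs : List Char),
        List.drop (List.takeWhile PySem.Chars.isspace xs).length xs
          = List.dropWhile PySem.Chars.isspace xs := by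
      intro xs
      induction xs with
      | nil => rfl
      | cons a t ih =>
        by_cases hp : PySem.Chars.isspace a
        · simp [hp, ih]
        · simp [hp]
    have hdrop : l.drop indent.length = stripped := by
      rw [hindlen,
        show l.length - stripped.length = (List.takeWhile PySem.Chars.isspace l).length from by omega,
        hdw, ← hstr']
    -- startswith vs take-prefix
    have hsw : ∀ (qs : List Char),
        PySem.Chars.startswith stripped qs = true ↔ stripped.take qs.length = qs := by
      intro qs
      rw [PySem.Chars.startswith_iff, List.prefix_iff_eq_take]
      exact ⟨fun h => h.symm, fun h => h.symm⟩
    have hrest : ∀ (ql : Nat), 0 < ql → ql ≤ stripped.length →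
        pvRestA line l indent ql max_length = pvGoB line l indent stripped ql max_length := by
      intro ql h1 h2
      exact pv_rest_eq line l indent stripped ql max_length h1 hdrop (by omega)
    have hlen_of_take : ∀ (k : Nat) (qs : List Char), stripped.take k = qs → qs.length = k →
        k ≤ stripped.length := by
      intro k qs h hq
      have := congrArg List.length h
      rw [List.length_take, hq] at this
      omega
    by_cases h3d : PySem.Chars.startswith stripped ['"', '"', '"'] = true
    · have ht3 : stripped.take 3 = ['"', '"', '"'] := (hsw _).mp h3d
      rw [if_pos h3d, if_pos (Or.inl ht3)]
      exact hrest 3 (by omega) (hlen_of_take 3 _ ht3 rfl)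
    · by_cases h3s : PySem.Chars.startswith stripped ['\'', '\'', '\''] = true
      · have ht3 : stripped.take 3 = ['\'', '\'', '\''] := (hsw _).mp h3s
        rw [if_neg h3d, if_pos h3s, if_pos (Or.inr ht3)]
        exact hrest 3 (by omega) (hlen_of_take 3 _ ht3 rfl)
      · have ht3d : ¬ stripped.take 3 = ['"', '"', '"'] := fun h => h3d ((hsw _).mpr h)
        have ht3s : ¬ stripped.take 3 = ['\'', '\'', '\''] := fun h => h3s ((hsw _).mpr h)
        by_cases h1 : PySem.Chars.startswith stripped ['"'] = true
        · have ht1 : stripped.take 1 = ['"'] := (hsw _).mp h1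
          rw [if_neg h3d, if_neg h3s, if_neg (by simp [h1]),
            if_neg (by rintro (h | h) <;> [exact ht3d h; exact ht3s h]), if_pos ht1]
          exact hrest 1 (by omega) (hlen_of_take 1 _ ht1 rfl)
        · have ht1 : ¬ stripped.take 1 = ['"'] := fun h => h1 ((hsw _).mpr h)
          rw [if_neg h3d, if_neg h3s, if_pos (by simp [h1]),
            if_neg (by rintro (h | h) <;> [exact ht3d h; exact ht3s h]), if_neg ht1]
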